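-- pv_equiv track=rewrite | github.com/amartyaj/Python_Practice | Code/Practice_1_03032025.py | minimize_sum
-- ===== SOURCE A (Python) =====
-- def minimize_sum(nums, k):
--     for _ in range(k):
--         # Find the index of the largest element in the array
--         max_index = 0
--         for i in range(1, len(nums)):
--             if nums[i] > nums[max_index]:
--                 max_index = i
--
--         # Perform the operation on the largest element
--         largest = nums[max_index]
--         new_value = (largest // 2) + (1 if largest % 2 != 0 else 0)
--         nums[max_index] = new_value
--
--     # Calculate the sum of the final array
--     return sum(nums)
-- ===== SOURCE B (Python) =====
-- def minimize_sum(nums, k):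
--     # Sort once (descending), then each round pop the head (the max) and
--     # re-insert its ceil-half at its sorted position by a forward scan.
--     s = sorted(nums, reverse=True)
--     for _ in range(k):
--         largest = s.pop(0)
--         half = -(-largest // 2)
--         i = 0
--         while i < len(s) and s[i] >= half:
--             i += 1
--         s.insert(i, half)
--     return sum(s)
-- ===== Notes on version B (the rewrite author's own statement) =====
-- stated objective: alternative
-- what changed: B sorts the list once in descending order and then keeps it sorted, popping the head (the maximum) and re-inserting its ceil-half at its sorted position, instead of A's full max-scan of the whole array in every round.
import Mathlib
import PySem

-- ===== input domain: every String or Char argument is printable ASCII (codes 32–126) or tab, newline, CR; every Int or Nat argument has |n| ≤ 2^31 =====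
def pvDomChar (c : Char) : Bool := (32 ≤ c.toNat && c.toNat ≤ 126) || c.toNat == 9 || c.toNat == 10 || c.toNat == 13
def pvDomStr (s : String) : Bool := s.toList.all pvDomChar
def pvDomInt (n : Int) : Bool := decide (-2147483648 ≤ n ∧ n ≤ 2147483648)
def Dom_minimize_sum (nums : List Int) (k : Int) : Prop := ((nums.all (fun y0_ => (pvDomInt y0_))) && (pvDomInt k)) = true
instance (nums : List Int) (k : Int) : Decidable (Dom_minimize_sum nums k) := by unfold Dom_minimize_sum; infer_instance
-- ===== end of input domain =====

-- B sorts once (descending) and maintains the sorted order (pop head, re-insert ceil-half),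
-- instead of A's full max-scan every round; return-value equivalence only (A mutates nums in place, B does not).

-- ===== PORT A =====
-- new_value = (largest // 2) + (1 if largest % 2 != 0 else 0)
def pvCeilHalfA (x : Int) : Int :=
  PySem.Int.floordiv x 2 + (if PySem.Int.mod x 2 ≠ 0 then 1 else 0)

-- one pass of A's outer loop body (nums[i]/nums[max_index] are always in range, so pyGetD is exact)
def pvStepA (nums : List Int) : List Int :=
  let maxIdx : Int := (PySem.List.pyRange 1 (nums.length : Int) 1).foldl
      (fun mi i => if PySem.List.pyGetD nums i 0 > PySem.List.pyGetD nums mi 0 then i else mi) 0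
  let largest := PySem.List.pyGetD nums maxIdx 0
  PySem.List.pySetD nums maxIdx (pvCeilHalfA largest)

def minimize_sum (nums : List Int) (k : Int) : Int :=
  (pvStepA^[k.toNat] nums).sum

-- ===== PORT B =====
-- half = -(-largest // 2)
def pvCeilHalfB (x : Int) : Int := -(PySem.Int.floordiv (-x) 2)

-- the forward-scan insertion keeping descending order (Source B's while + insert)
def pvInsertDesc (x : Int) : List Int → List Int
  | [] => [x]
  | h :: t => if h ≥ x then h :: pvInsertDesc x t else x :: h :: t

-- one pass of B's loop body: pop the head, insert its ceil-half
def pvStepB : List Int → List Int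
  | [] => []
  | h :: t => pvInsertDesc (pvCeilHalfB h) t

def minimize_sum_alt (nums : List Int) (k : Int) : Int :=
  (pvStepB^[k.toNat] (PySem.List.sorted nums (fun x => x) true)).sum

-- ===== PRECONDITION & SPEC =====
-- On an empty list with k ≥ 1 both A and B raise IndexError; those inputs are excluded.
def Pre_minimize_sum (nums : List Int) (k : Int) : Prop := nums ≠ [] ∨ k ≤ 0
instance (nums : List Int) (k : Int) : Decidable (Pre_minimize_sum nums k) := by
  unfold Pre_minimize_sum; infer_instance
def pvWitness_minimize_sum : List Int × Int := ([5, 3, 9], 3)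

def Spec_minimize_sum (nums : List Int) (k : Int) (out : Int) : Prop := out = minimize_sum_alt nums k
instance (nums : List Int) (k : Int) (out : Int) : Decidable (Spec_minimize_sum nums k out) := by
  unfold Spec_minimize_sum; infer_instance

-- ===== CLAIM (what is proved, stated in full; the proofs are below) =====
def Claim_equal_minimize_sum : Prop := ∀ (nums : List Int) (k : Int), Dom_minimize_sum nums k → Pre_minimize_sum nums k → Spec_minimize_sum nums k (minimize_sum nums k)

-- ===== LEMMAS AND PROOFS =====

-- the two ceil-half formulas agree
theorem pvCeilHalf_eq (x : Int) : pvCeilHalfA x = pvCeilHalfB x := by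
  unfold pvCeilHalfA pvCeilHalfB
  rw [PySem.Int.floordiv_eq_ediv_of_pos (a := x) (by omega),
    PySem.Int.floordiv_eq_ediv_of_pos (a := -x) (by omega),
    PySem.Int.mod_eq_emod_of_pos (a := x) (by omega)]
  omega

theorem mem_pvInsertDesc {y x : Int} : ∀ {t : List Int}, y ∈ pvInsertDesc x t ↔ y = x ∨ y ∈ t := by
  intro t
  induction t with
  | nil => simp [pvInsertDesc]
  | cons h t ih =>
    by_cases hc : h ≥ x
    · simp [pvInsertDesc, hc, ih]
      tauto
    · simp [pvInsertDesc, hc]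

theorem pvInsertDesc_perm (x : Int) : ∀ (t : List Int), (pvInsertDesc x t).Perm (x :: t) := by
  intro t
  induction t with
  | nil => simp [pvInsertDesc]
  | cons h t ih =>
    by_cases hc : h ≥ x
    · simpa [pvInsertDesc, hc] using ((ih.cons h).trans (List.Perm.swap x h t))
    · simp [pvInsertDesc, hc]

theorem pvInsertDesc_pairwise {x : Int} : ∀ {t : List Int},
    t.Pairwise (fun a b => b ≤ a) → (pvInsertDesc x t).Pairwise (fun a b => b ≤ a) := by
  intro t hp
  induction t with
  | nil => simp [pvInsertDesc]
  | cons h t ih =>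
    rw [List.pairwise_cons] at hp
    by_cases hc : h ≥ x
    · rw [pvInsertDesc, if_pos hc, List.pairwise_cons]
      refine ⟨?_, ih hp.2⟩
      intro y hy
      rcases mem_pvInsertDesc.mp hy with rfl | hy
      · exact hc
      · exact hp.1 y hy
    · rw [pvInsertDesc, if_neg hc, List.pairwise_cons]
      refine ⟨?_, List.pairwise_cons.mpr hp⟩
      intro y hy
      rcases List.mem_cons.mp hy with rfl | hy
      · omega
      · have := hp.1 y hy; omega

-- A's max-index fold: the result is an in-range index beating the start index and every i ∈ [j, len)
theorem pvFoldMax_spec (nums : List Int) : ∀ (n : Nat) (j mi0 : Int), 0 ≤ j →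
    0 ≤ mi0 → mi0 < (nums.length : Int) → (nums.length : Int) - j ≤ (n : Int) →
    let mi := (PySem.List.pyRange j (nums.length : Int) 1).foldl
      (fun mi i => if PySem.List.pyGetD nums i 0 > PySem.List.pyGetD nums mi 0 then i else mi) mi0
    0 ≤ mi ∧ mi < (nums.length : Int) ∧
      PySem.List.pyGetD nums mi0 0 ≤ PySem.List.pyGetD nums mi 0 ∧
      ∀ i : Int, j ≤ i → i < (nums.length : Int) →
        PySem.List.pyGetD nums i 0 ≤ PySem.List.pyGetD nums mi 0 := by
  intro n
  induction n with
  | zero =>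
    intro j mi0 hj0 h0 h1 hn
    rw [PySem.List.pyRange_one_eq_nil (by omega)]
    exact ⟨h0, h1, le_refl _, by intro i hi1 hi2; omega⟩
  | succ n ih =>
    intro j mi0 hj0 h0 h1 hn
    by_cases hj : (nums.length : Int) ≤ j
    · rw [PySem.List.pyRange_one_eq_nil hj]
      exact ⟨h0, h1, le_refl _, by intro i hi1 hi2; omega⟩
    · rw [PySem.List.pyRange_one_cons (by omega), List.foldl_cons]
      by_cases hlt : PySem.List.pyGetD nums j 0 > PySem.List.pyGetD nums mi0 0
      · rw [if_pos hlt]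
        obtain ⟨ha, hb, hc, hd⟩ := ih (j + 1) j (by omega) (by omega) (by omega) (by omega)
        refine ⟨ha, hb, le_trans (le_of_lt hlt) hc, ?_⟩
        intro i hi1 hi2
        rcases eq_or_lt_of_le hi1 with rfl | hgt
        · exact hc
        · exact hd i (by omega) hi2
      · rw [if_neg hlt]
        obtain ⟨ha, hb, hc, hd⟩ := ih (j + 1) mi0 (by omega) h0 h1 (by omega)
        refine ⟨ha, hb, hc, ?_⟩
        intro i hi1 hi2
        rcases eq_or_lt_of_le hi1 with rfl | hgt
        · exact le_trans (by omega) hc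
        · exact hd i (by omega) hi2

-- one step: the permutation between the two sides, the descending order and nonemptiness are preserved
theorem pvStep_perm (s nums : List Int) (hperm : s.Perm nums)
    (hsort : s.Pairwise (fun a b => b ≤ a)) (hne : nums ≠ []) :
    (pvStepB s).Perm (pvStepA nums) ∧ (pvStepB s).Pairwise (fun a b => b ≤ a) ∧ pvStepA nums ≠ [] := by
  have hlen : 0 < nums.length := List.length_pos_iff.mpr hne
  obtain ⟨h0, h1, hzero, hmax⟩ :=
    pvFoldMax_spec nums nums.length 1 0 (by omega) (by omega) (by exact_mod_cast hlen) (by omega)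
  set mi := (PySem.List.pyRange 1 (nums.length : Int) 1).foldl
      (fun mi i => if PySem.List.pyGetD nums i 0 > PySem.List.pyGetD nums mi 0 then i else mi) 0 with hmi
  set M := PySem.List.pyGetD nums mi 0 with hM
  have hmax' : ∀ a ∈ nums, a ≤ M := by
    intro a ha
    obtain ⟨i, hi, rfl⟩ := List.mem_iff_getElem.mp ha
    have h2 : PySem.List.pyGetD nums (i : Int) 0 = nums[i] := by
      rw [PySem.List.pyGetD_eq_getElem nums 0 (by omega) (by exact_mod_cast hi)]
      simp
    rcases Nat.eq_zero_or_pos i with rfl | hpos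
    · rw [← h2]; exact_mod_cast hzero
    · rw [← h2]; exact hmax i (by exact_mod_cast hpos) (by exact_mod_cast hi)
  have hmiLt : mi.toNat < nums.length := by omega
  have hAget : nums[mi.toNat] = M := by
    rw [hM, PySem.List.pyGetD_eq_getElem nums 0 h0 h1]
  have hA : (pvStepA nums).Perm (pvCeilHalfA M :: nums.eraseIdx mi.toNat) := by
    show (PySem.List.pySetD nums mi (pvCeilHalfA (PySem.List.pyGetD nums mi 0))).Perm
      (pvCeilHalfA M :: nums.eraseIdx mi.toNat)
    rw [PySem.List.pySetD_of_nonneg nums _ h0, ← hM]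
    exact List.set_perm_cons_eraseIdx hmiLt _
  have hMmem : M ∈ nums := by
    rw [← hAget]; exact List.getElem_mem _
  obtain ⟨h, t, rfl⟩ : ∃ h t, s = h :: t := by
    rcases s with _ | ⟨h, t⟩
    · exact absurd hperm.symm.eq_nil hne
    · exact ⟨h, t, rfl⟩
  have hhead : h = M := by
    have hle : h ≤ M := hmax' h (hperm.mem_iff.mp List.mem_cons_self)
    have hge : M ≤ h := by
      have hMs : M ∈ h :: t := hperm.mem_iff.mpr hMmem
      rcases List.mem_cons.mp hMs with rfl | hMs
      · rfl
      · exact (List.pairwise_cons.mp hsort).1 M hMs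
    omega
  have ht : t.Perm (nums.eraseIdx mi.toNat) := by
    have h2 : (h :: t).Perm (M :: nums.eraseIdx mi.toNat) :=
      hperm.trans (hAget ▸ (List.getElem_cons_eraseIdx_perm hmiLt).symm)
    rw [hhead] at h2
    exact h2.cons_inv
  have hB : (pvStepB (h :: t)).Perm (pvCeilHalfA M :: nums.eraseIdx mi.toNat) := by
    show (pvInsertDesc (pvCeilHalfB h) t).Perm (pvCeilHalfA M :: nums.eraseIdx mi.toNat)
    rw [← pvCeilHalf_eq, hhead]
    exact (pvInsertDesc_perm _ t).trans (ht.cons _)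
  refine ⟨hB.trans hA.symm, ?_, ?_⟩
  · exact pvInsertDesc_pairwise (List.pairwise_cons.mp hsort).2
  · intro hnil
    have := hA.length_eq
    rw [hnil] at this
    simp at this

theorem pvIter_spec (n : Nat) : ∀ (s nums : List Int), s.Perm nums →
    s.Pairwise (fun a b => b ≤ a) → nums ≠ [] →
    (pvStepB^[n] s).Perm (pvStepA^[n] nums) ∧
      (pvStepB^[n] s).Pairwise (fun a b => b ≤ a) ∧ pvStepA^[n] nums ≠ [] := by
  induction n with
  | zero => intro s nums h1 h2 h3; exact ⟨h1, h2, h3⟩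
  | succ n ih =>
    intro s nums h1 h2 h3
    obtain ⟨p1, p2, p3⟩ := pvStep_perm s nums h1 h2 h3
    rw [Function.iterate_succ_apply, Function.iterate_succ_apply]
    exact ih _ _ p1 p2 p3

-- ===== VERDICT (by name: the statement is the Claim_ definition above) =====
theorem minimize_sum_spec : Claim_equal_minimize_sum := by
  intro nums k _ hpre
  unfold Spec_minimize_sum minimize_sum minimize_sum_alt
  have hperm : (PySem.List.sorted nums (fun x => x) true).Perm nums :=
    PySem.List.sorted_perm _ _ _
  have hsort : (PySem.List.sorted nums (fun x => x) true).Pairwise (fun a b => b ≤ a) :=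
    PySem.List.sorted_pairwise_rev _ _
  rcases eq_or_ne nums [] with rfl | hne
  · have hk : k.toNat = 0 := by
      rcases hpre with h | h
      · exact absurd rfl h
      · omega
    rw [hk]
    simp [hperm.eq_nil]
  · exact ((pvIter_spec k.toNat _ _ hperm hsort hne).1.sum_eq).symm
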